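-- pv_equiv track=rewrite | github.com/s1rGAY/Univer | term-3/AOIS/lab-1.py | sum_of_positive
-- ===== SOURCE A (Python) =====
-- size=16
--
-- def convert(n, p=2, q=10):
--     D = '0123456789'
--     if isinstance(n, str):
--         n = float(n, q)
--     if n >= p:
--         return convert(n // p, p) + D[n % p]
--     else:
--         return D[n]
--
-- def sum_of_positive(first_num, sec_num):
--     answer = ["0" for str_code in range(size)]
--     overload = 0;
--     first_num,sec_num=to_straight_code(first_num),to_straight_code(sec_num)
--     for a in range(14):
--             a=15-a
--             temp_f,temp_s=int(first_num[a]),int(sec_num[a])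
--
--             if temp_f+temp_s+overload<2:
--                 answer[a]=str(temp_f+temp_s+overload)
--                 overload=0
--             elif temp_f+temp_s+overload==2:
--                 answer[a]='0'
--                 overload=1
--             else:
--                 answer[a]='1'
--                 overload=1
--     return answer
--
-- def to_straight_code(number):
--     str_code = ["0" for str_code in range(size)] #заполнение 0 при помощи генератора списков
--
--     if number<0:
--         number=abs(number)
--         str_code[0]="1"
--
--     number=list(str(convert(number))) #перевод в двоичную систему
--
--     for a in range(len(number)):
--         str_code[len(str_code)-(a+1)]=number[len(number)-(a+1)]
--     return str_code
-- ===== SOURCE B (Python) =====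
-- size = 16
--
-- def convert(n, p=2, q=10):
--     D = '0123456789'
--     if isinstance(n, str):
--         n = float(n, q)
--     if n >= p:
--         return convert(n // p, p) + D[n % p]
--     else:
--         return D[n]
--
-- def to_straight_code(number):
--     str_code = ["0" for _ in range(size)]
--     if number < 0:
--         number = abs(number)
--         str_code[0] = "1"
--     number = list(str(convert(number)))
--     for a in range(len(number)):
--         str_code[len(str_code) - (a + 1)] = number[len(number) - (a + 1)]
--     return str_code
--
-- def sum_of_positive(first_num, sec_num):
--     f = to_straight_code(first_num)
--     s = to_straight_code(sec_num)
--     n1 = int(''.join(f[2:16]), 2)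
--     n2 = int(''.join(s[2:16]), 2)
--     total = (n1 + n2) & 0x3FFF
--     return ["0", "0"] + list(format(total, '014b'))
-- ===== Notes on version B (the rewrite author's own statement) =====
-- stated objective: simpler
-- what changed: The 14-step ripple-carry loop with explicit carry bookkeeping is replaced by one integer addition: the magnitude bits of both straight codes are read as integers, added, masked to 14 bits, and formatted back in one pass.
import Mathlib
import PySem

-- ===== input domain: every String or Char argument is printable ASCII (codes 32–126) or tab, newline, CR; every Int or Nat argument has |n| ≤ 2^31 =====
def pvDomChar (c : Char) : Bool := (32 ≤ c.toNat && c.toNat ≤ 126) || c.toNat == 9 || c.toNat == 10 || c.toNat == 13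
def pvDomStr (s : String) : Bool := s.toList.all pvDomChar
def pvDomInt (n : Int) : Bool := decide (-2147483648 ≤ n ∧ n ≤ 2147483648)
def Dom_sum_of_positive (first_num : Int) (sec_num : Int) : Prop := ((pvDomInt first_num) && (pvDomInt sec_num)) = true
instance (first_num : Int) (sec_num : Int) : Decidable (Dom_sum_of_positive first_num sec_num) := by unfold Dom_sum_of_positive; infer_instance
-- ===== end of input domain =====

-- B replaces the ripple-carry loop by one integer addition of the two 14-bit magnitudes,
-- masked to 14 bits and formatted back (objective: simpler). Both keep the same to_straight_code front-end.

-- ===== PORT A =====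
-- convert(n, 2): binary digits of n, recursion on n // 2; n is always a nonnegative int here,
-- and D[n % 2] / D[n] only ever index 0 or 1, written out as the two reachable characters.
def convertN : Nat → List Char
  | n =>
    if _h : 2 ≤ n then
      convertN (n / 2) ++ [if n % 2 = 0 then '0' else '1']
    else
      [if n = 0 then '0' else '1']
  decreasing_by exact Nat.div_lt_self (by omega) (by omega)

-- to_straight_code: fill 16 "0"s, sign bit, then copy the binary digits from the right;
-- Python's negative list-assignment index wraps once (idx + 16), exact for |number| ≤ 2^31
-- (digit count ≤ 32, so idx ≥ -16; the .toNat is then exact).  The .getD '0' on the digit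
-- read is unreachable (the index is always in range).
def toStraightCode (number : Int) : List String :=
  let str_code : List String := List.replicate 16 "0"
  let p := if number < 0 then (-number, str_code.set 0 "1") else (number, str_code)
  let digits := convertN p.1.toNat
  (List.range digits.length).foldl
    (fun sc (a : Nat) =>
      let idx : Int := 16 - ((a : Int) + 1)
      let idx := if idx < 0 then idx + 16 else idx
      sc.set idx.toNat (String.ofList [digits.getD (digits.length - (a + 1)) '0']))
    p.2

-- the ripple-carry loop, step for step; f[a]/s[a] are always in range and "0"/"1",
-- so the .getD defaults after pyGet?/ofStr? are unreachable (totality only)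
def sum_of_positive (first_num : Int) (sec_num : Int) : List String :=
  let answer : List String := (List.range 16).map (fun _ => "0")
  let f := toStraightCode first_num
  let s := toStraightCode sec_num
  let res := (List.range 14).foldl
    (fun (st : List String × Int) a =>
      let answer := st.1
      let overload := st.2
      let a : Nat := 15 - a
      let temp_f := (PySem.Int.ofStr? ((PySem.List.pyGet? f (a : Int)).getD "0")).getD 0
      let temp_s := (PySem.Int.ofStr? ((PySem.List.pyGet? s (a : Int)).getD "0")).getD 0
      if temp_f + temp_s + overload < 2 then
        (answer.set a (PySem.Int.toStr (temp_f + temp_s + overload)), 0)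
      else if temp_f + temp_s + overload = 2 then
        (answer.set a "0", 1)
      else
        (answer.set a "1", 1))
    (answer, (0 : Int))
  res.1

-- ===== PORT B =====
-- int(''.join(L), 2): exact because every element of a straight code is "0" or "1"
def bitsVal (L : List String) : Nat :=
  L.foldl (fun acc d => 2 * acc + (if d = "1" then 1 else 0)) 0

-- list(format(n, '0{k}b')) for n < 2^k: k binary digits, MSB first
def toBits : Nat → Nat → List String
  | 0, _ => []
  | k + 1, n => toBits k (n / 2) ++ [if n % 2 = 1 then "1" else "0"]

def sum_of_positive_alt (first_num : Int) (sec_num : Int) : List String :=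
  let f := toStraightCode first_num
  let s := toStraightCode sec_num
  let n1 := bitsVal (PySem.List.slice f (some 2) (some 16))
  let n2 := bitsVal (PySem.List.slice s (some 2) (some 16))
  let total := (n1 + n2) &&& 0x3FFF
  ["0", "0"] ++ toBits 14 total

-- ===== PRECONDITION & SPEC =====
def Spec_sum_of_positive (first_num : Int) (sec_num : Int) (out : List String) : Prop := out = sum_of_positive_alt first_num sec_num
instance (first_num : Int) (sec_num : Int) (out : List String) : Decidable (Spec_sum_of_positive first_num sec_num out) := by unfold Spec_sum_of_positive; infer_instance

-- ===== CLAIM (what is proved, stated in full; the proofs are below) =====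
def Claim_equal_sum_of_positive : Prop := ∀ (first_num : Int) (sec_num : Int), Dom_sum_of_positive first_num sec_num → Spec_sum_of_positive first_num sec_num (sum_of_positive first_num sec_num)


-- ===== LEMMAS AND PROOFS =====

-- value of a binary digit string
def pvVal (d : String) : Nat := if d = "1" then 1 else 0

-- the 14 magnitude digits of a straight code, as a number
def pvM (F : List String) : Nat := bitsVal ((F.drop 2).take 14)

def pvBitStr (m j : Nat) : String := if m / 2^j % 2 = 1 then "1" else "0"

-- the answer list after k loop steps (positions 15 down to 16-k written)
def pvAns (F S : List String) (k : Nat) : List String :=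
  (List.range 16).map (fun p => if 16 - k ≤ p then pvBitStr (pvM F + pvM S) (15 - p) else "0")

-- the carry after k loop steps
def pvCarry (F S : List String) (k : Nat) : Nat :=
  (pvM F % 2^k + pvM S % 2^k) / 2^k

theorem pv_foldl_inv {α : Type} {β : Type} (P : α → Prop) (f : α → β → α) (L : List β)
    (s : α) (h0 : P s) (hf : ∀ s b, P s → P (f s b)) : P (L.foldl f s) := by
  induction L generalizing s with
  | nil => exact h0
  | cons x xs ih => exact ih _ (hf s x h0)

theorem convertN_mem (n : Nat) : ∀ c ∈ convertN n, c = '0' ∨ c = '1' := by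
  induction n using Nat.strong_induction_on with
  | _ n ih =>
    intro c hc
    rw [convertN] at hc
    split at hc
    · rcases List.mem_append.1 hc with h | h
      · exact ih (n / 2) (Nat.div_lt_self (by omega) (by omega)) c h
      · simp only [List.mem_singleton] at h; subst h; split <;> simp
    · simp only [List.mem_singleton] at hc; subst hc; split <;> simp

theorem straight_ok (n : Int) :
    (toStraightCode n).length = 16 ∧ ∀ x ∈ toStraightCode n, x = "0" ∨ x = "1" := by
  unfold toStraightCode
  refine pv_foldl_inv (fun (sc : List String) => sc.length = 16 ∧ ∀ x ∈ sc, x = "0" ∨ x = "1") _ _ _ ?_ ?_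
  · split
    · refine ⟨by simp, ?_⟩
      intro x hx
      rcases List.mem_or_eq_of_mem_set hx with h | h
      · exact Or.inl (List.eq_of_mem_replicate h)
      · exact Or.inr h
    · exact ⟨by simp, fun x hx => Or.inl (List.eq_of_mem_replicate hx)⟩
  · intro sc a hsc
    refine ⟨by simpa using hsc.1, ?_⟩
    intro x hx
    rcases List.mem_or_eq_of_mem_set hx with h | h
    · exact hsc.2 x h
    · subst h
      set digits := convertN (if n < 0 then (-n, (List.replicate 16 "0").set 0 "1") else (n, List.replicate 16 "0")).1.toNat with hd
      have hdig : digits.getD (digits.length - (a + 1)) '0' = '0' ∨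
          digits.getD (digits.length - (a + 1)) '0' = '1' := by
        rcases h : digits[digits.length - (a+1)]? with _ | c
        · left; simp [List.getD, h]
        · have hm : c ∈ digits := List.mem_of_getElem? h
          have := convertN_mem _ c hm
          simpa [List.getD, h] using this
      rcases hdig with h' | h' <;> rw [h'] <;> simp

-- bitsVal: shifting in an accumulator
theorem bitsVal_shift (L : List String) : ∀ acc : Nat,
    L.foldl (fun acc d => 2 * acc + (if d = "1" then 1 else 0)) acc
      = acc * 2^L.length + bitsVal L := by
  induction L with
  | nil => intro acc; simp [bitsVal]
  | cons x xs ih =>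
    intro acc
    have h0 : bitsVal (x :: xs) = pvVal x * 2^xs.length + bitsVal xs := by
      simp only [bitsVal, List.foldl_cons]
      rw [ih]
      simp [bitsVal, pvVal]
    simp only [List.foldl_cons]
    rw [ih, h0]
    have : (2 * acc + (if x = "1" then 1 else 0)) * 2^xs.length
        = acc * 2^(xs.length + 1) + pvVal x * 2^xs.length := by
      rw [pow_succ, pvVal]; ring
    simp only [List.length_cons]
    omega

theorem bitsVal_cons (x : String) (xs : List String) :
    bitsVal (x :: xs) = pvVal x * 2^xs.length + bitsVal xs := by
  simp only [bitsVal, List.foldl_cons]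
  rw [bitsVal_shift]
  simp [bitsVal, pvVal]

theorem pvVal_le (x : String) (h : x = "0" ∨ x = "1") : pvVal x ≤ 1 := by
  rcases h with h | h <;> simp [pvVal, h]

theorem bitsVal_lt (L : List String) (h : ∀ x ∈ L, x = "0" ∨ x = "1") :
    bitsVal L < 2^L.length := by
  induction L with
  | nil => simp [bitsVal]
  | cons x xs ih =>
    have hx := pvVal_le x (h x (by simp))
    have hxs := ih (fun y hy => h y (by simp [hy]))
    rw [bitsVal_cons]
    simp only [List.length_cons]
    have h2 : (2:Nat)^(xs.length + 1) = 2^xs.length * 2 := pow_succ 2 xs.length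
    have h3 : pvVal x * 2^xs.length ≤ 2^xs.length := by
      calc pvVal x * 2^xs.length ≤ 1 * 2^xs.length := Nat.mul_le_mul_right _ hx
        _ = 2^xs.length := one_mul _
    omega

theorem bitsVal_getElem (L : List String) (h : ∀ x ∈ L, x = "0" ∨ x = "1") :
    ∀ i (hi : i < L.length), bitsVal L / 2^(L.length - 1 - i) % 2 = pvVal L[i] := by
  induction L with
  | nil => intro i hi; simp at hi
  | cons x xs ih =>
    intro i hi
    have hlt := bitsVal_lt xs (fun y hy => h y (by simp [hy]))
    have hx := pvVal_le x (h x (by simp))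
    cases i with
    | zero =>
      simp only [List.length_cons, Nat.add_sub_cancel, Nat.sub_zero, List.getElem_cons_zero]
      rw [bitsVal_cons, add_comm, mul_comm]
      rw [Nat.add_mul_div_left _ _ (Nat.two_pow_pos xs.length)]
      rw [Nat.div_eq_of_lt hlt]
      omega
    | succ i =>
      have hii : i < xs.length := by simpa using hi
      simp only [List.length_cons, List.getElem_cons_succ]
      have he : (xs.length + 1) - 1 - (i + 1) = xs.length - 1 - i := by omega
      rw [he, bitsVal_cons]
      have hsplit : (2:Nat)^xs.length = 2^(i+1) * 2^(xs.length - 1 - i) := by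
        rw [← pow_add]; congr 1; omega
      rw [hsplit, ← mul_assoc, add_comm]
      rw [Nat.add_mul_div_right _ _ (Nat.two_pow_pos (xs.length - 1 - i))]
      have : pvVal x * 2^(i+1) = (pvVal x * 2^i) * 2 := by rw [pow_succ]; ring
      rw [this, Nat.add_mul_mod_self_right]
      exact ih (fun y hy => h y (by simp [hy])) i hii

theorem toBits_length (k n : Nat) : (toBits k n).length = k := by
  induction k generalizing n with
  | zero => simp [toBits]
  | succ k ih => simp [toBits, ih]

theorem toBits_getElem (k : Nat) : ∀ (n i : Nat), i < k →
    (toBits k n)[i]? = some (if n / 2^(k - 1 - i) % 2 = 1 then "1" else "0") := by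
  induction k with
  | zero => intro n i hi; omega
  | succ k ih =>
    intro n i hi
    by_cases hik : i < k
    · have hlen : i < (toBits k (n / 2)).length := by rw [toBits_length]; exact hik
      simp only [toBits]
      rw [List.getElem?_append_left hlen, ih (n/2) i hik]
      have he : n / 2 / 2^(k - 1 - i) = n / 2^(k + 1 - 1 - i) := by
        rw [Nat.div_div_eq_div_mul, ← pow_succ']
        congr 2
        omega
      rw [he]
    · have hik' : i = k := by omega
      subst hik'
      simp only [toBits]
      rw [List.getElem?_append_right (by simp [toBits_length])]
      simp [toBits_length]

-- the core carry/bit arithmetic of binary addition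
theorem carry_step (m1 m2 k : Nat) :
    (m1 % 2^k + m2 % 2^k) / 2^k ≤ 1
  ∧ (m1 / 2^k % 2 + m2 / 2^k % 2 + (m1 % 2^k + m2 % 2^k) / 2^k) % 2 = (m1 + m2) / 2^k % 2
  ∧ (m1 / 2^k % 2 + m2 / 2^k % 2 + (m1 % 2^k + m2 % 2^k) / 2^k) / 2
      = (m1 % 2^(k+1) + m2 % 2^(k+1)) / 2^(k+1) := by
  set P := 2^k with hPdef
  have hP : 0 < P := Nat.two_pow_pos k
  set r1 := m1 % P with hr1d
  set r2 := m2 % P with hr2d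
  set b1 := m1 / P % 2 with hb1d
  set b2 := m2 / P % 2 with hb2d
  set q1 := m1 / P / 2 with hq1d
  set q2 := m2 / P / 2 with hq2d
  set c := (r1 + r2) / P with hcd
  set s := (r1 + r2) % P with hsd
  have hr1 : r1 < P := Nat.mod_lt _ hP
  have hr2 : r2 < P := Nat.mod_lt _ hP
  have hb1 : b1 ≤ 1 := by omega
  have hb2 : b2 ≤ 1 := by omega
  have hs : s < P := Nat.mod_lt _ hP
  have hcs : P * c + s = r1 + r2 := Nat.div_add_mod _ _
  have hc : c ≤ 1 := by
    have : (r1 + r2) / P < 2 := (Nat.div_lt_iff_lt_mul hP).2 (by omega)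
    omega
  have hm1 : P * (2 * q1 + b1) + r1 = m1 := by
    have d1 : P * (m1 / P) + r1 = m1 := Nat.div_add_mod _ _
    have e1 : 2 * q1 + b1 = m1 / P := Nat.div_add_mod _ _
    rw [e1]; exact d1
  have hm2 : P * (2 * q2 + b2) + r2 = m2 := by
    have d2 : P * (m2 / P) + r2 = m2 := Nat.div_add_mod _ _
    have e2 : 2 * q2 + b2 = m2 / P := Nat.div_add_mod _ _
    rw [e2]; exact d2
  refine ⟨hc, ?_, ?_⟩
  · -- bit equation
    have hsum : m1 + m2 = P * (2 * q1 + 2 * q2 + b1 + b2 + c) + s := by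
      have hx : P * (2 * q1 + 2 * q2 + b1 + b2 + c)
          = P * (2 * q1 + b1) + P * (2 * q2 + b2) + P * c := by ring
      omega
    rw [hsum, Nat.mul_add_div hP, Nat.div_eq_of_lt hs]
    omega
  · -- carry equation
    have hP1 : (2:Nat)^(k+1) = P * 2 := by rw [pow_succ]
    have hPb1 : P * b1 ≤ P := by
      calc P * b1 ≤ P * 1 := Nat.mul_le_mul_left P hb1
        _ = P := mul_one P
    have hPb2 : P * b2 ≤ P := by
      calc P * b2 ≤ P * 1 := Nat.mul_le_mul_left P hb2
        _ = P := mul_one P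
    have hm1' : m1 % (P * 2) = P * b1 + r1 := by
      have h1 : m1 = (P * 2) * q1 + (P * b1 + r1) := by
        have hx : P * (2 * q1 + b1) = (P * 2) * q1 + P * b1 := by ring
        omega
      rw [h1, Nat.mul_add_mod]
      exact Nat.mod_eq_of_lt (by omega)
    have hm2' : m2 % (P * 2) = P * b2 + r2 := by
      have h1 : m2 = (P * 2) * q2 + (P * b2 + r2) := by
        have hx : P * (2 * q2 + b2) = (P * 2) * q2 + P * b2 := by ring
        omega
      rw [h1, Nat.mul_add_mod]
      exact Nat.mod_eq_of_lt (by omega)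
    rw [hP1, hm1', hm2']
    have hsum2 : P * b1 + r1 + (P * b2 + r2) = P * (b1 + b2 + c) + s := by
      have hx : P * (b1 + b2 + c) = P * b1 + P * b2 + P * c := by ring
      omega
    rw [hsum2, ← Nat.div_div_eq_div_mul, Nat.mul_add_div hP, Nat.div_eq_of_lt hs]
    omega


theorem read_bit (F : List String) (hFl : F.length = 16)
    (hF : ∀ x ∈ F, x = "0" ∨ x = "1") (k : Nat) (hk : k < 14) :
    (PySem.Int.ofStr? ((PySem.List.pyGet? F (((15 - k : Nat) : Nat) : Int)).getD "0")).getD 0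
      = ((pvM F / 2^k % 2 : Nat) : Int) := by
  have hlt : 15 - k < F.length := by omega
  have h1 : (PySem.List.pyGet? F (((15 - k : Nat) : Nat) : Int)) = F[(15 - k : Nat)]? :=
    PySem.List.pyGet?_natCast F (15 - k)
  rw [h1, List.getElem?_eq_getElem hlt]
  have hMlen : ((F.drop 2).take 14).length = 14 := by simp [hFl]
  have hMbin : ∀ x ∈ (F.drop 2).take 14, x = "0" ∨ x = "1" :=
    fun x hx => hF x (List.mem_of_mem_drop (List.mem_of_mem_take hx))
  have hidx : 13 - k < ((F.drop 2).take 14).length := by omega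
  have hbit := bitsVal_getElem _ hMbin (13 - k) hidx
  have hexp : ((F.drop 2).take 14).length - 1 - (13 - k) = k := by omega
  rw [hexp] at hbit
  have hMF : ((F.drop 2).take 14)[13 - k]'hidx = F[15 - k]'hlt := by
    rw [List.getElem_take, List.getElem_drop]
    congr 1
    omega
  rw [hMF] at hbit
  rw [show pvM F = bitsVal ((F.drop 2).take 14) from rfl, hbit]
  rcases hF (F[15 - k]'hlt) (List.getElem_mem hlt) with h | h <;> rw [h] <;>
    simp [pvVal] <;> decide

theorem branch_pair (ans : List String) (a : Nat) (b1 b2 c : Nat)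
    (h1 : b1 ≤ 1) (h2 : b2 ≤ 1) (h3 : c ≤ 1) :
    (if ((b1 : Nat) : Int) + ((b2 : Nat) : Int) + ((c : Nat) : Int) < 2 then
       (ans.set a (PySem.Int.toStr (((b1 : Nat) : Int) + ((b2 : Nat) : Int) + ((c : Nat) : Int))), (0 : Int))
     else if ((b1 : Nat) : Int) + ((b2 : Nat) : Int) + ((c : Nat) : Int) = 2 then
       (ans.set a "0", (1 : Int))
     else
       (ans.set a "1", (1 : Int)))
    = (ans.set a (if (b1 + b2 + c) % 2 = 1 then "1" else "0"), (((b1 + b2 + c) / 2 : Nat) : Int)) := by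
  interval_cases b1 <;> interval_cases b2 <;> interval_cases c <;>
    norm_num [show PySem.Int.toStr 0 = "0" from by decide,
              show PySem.Int.toStr 1 = "1" from by decide]

theorem pvAns_zero (F S : List String) : pvAns F S 0 = (List.range 16).map (fun _ => "0") := by
  unfold pvAns
  apply List.map_congr_left
  intro p hp
  have : p < 16 := List.mem_range.1 hp
  simp
  omega

theorem pvCarry_zero (F S : List String) : pvCarry F S 0 = 0 := by
  simp [pvCarry, Nat.mod_one]

theorem pvAns_succ (F S : List String) (k : Nat) (hk : k < 14) :
    (pvAns F S k).set (15 - k) (if (pvM F + pvM S) / 2^k % 2 = 1 then "1" else "0")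
      = pvAns F S (k + 1) := by
  apply List.ext_getElem
  · simp [pvAns]
  · intro p h1 h2
    have hp : p < 16 := by simpa [pvAns] using h2
    rw [List.getElem_set]
    simp only [pvAns, List.getElem_map, List.getElem_range]
    by_cases hpk : 15 - k = p
    · have h15 : 15 - p = k := by omega
      simp only [if_pos hpk]
      rw [if_pos (by omega : 16 - (k + 1) ≤ p), h15]
      rfl
    · simp only [if_neg hpk]
      by_cases h16 : 16 - k ≤ p
      · rw [if_pos h16, if_pos (by omega : 16 - (k + 1) ≤ p)]
      · rw [if_neg h16, if_neg (by omega : ¬ 16 - (k + 1) ≤ p)]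

theorem loop_char (F S : List String) (hFl : F.length = 16) (hSl : S.length = 16)
    (hF : ∀ x ∈ F, x = "0" ∨ x = "1") (hS : ∀ x ∈ S, x = "0" ∨ x = "1") :
    ∀ k, k ≤ 14 →
    (List.range k).foldl
      (fun (st : List String × Int) (a : Nat) =>
        let answer := st.1
        let overload := st.2
        let a : Nat := 15 - a
        let temp_f := (PySem.Int.ofStr? ((PySem.List.pyGet? F (a : Int)).getD "0")).getD 0
        let temp_s := (PySem.Int.ofStr? ((PySem.List.pyGet? S (a : Int)).getD "0")).getD 0
        if temp_f + temp_s + overload < 2 then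
          (answer.set a (PySem.Int.toStr (temp_f + temp_s + overload)), 0)
        else if temp_f + temp_s + overload = 2 then
          (answer.set a "0", 1)
        else
          (answer.set a "1", 1))
      ((List.range 16).map (fun _ => "0"), (0 : Int))
    = (pvAns F S k, ((pvCarry F S k : Nat) : Int)) := by
  intro k
  induction k with
  | zero =>
    intro _
    simp [pvAns_zero, pvCarry_zero]
  | succ k ih =>
    intro hk
    rw [show List.range (k + 1) = List.range k ++ [k] from List.range_succ,
        List.foldl_append, ih (by omega), List.foldl_cons, List.foldl_nil]
    dsimp only
    rw [read_bit F hFl hF k (by omega), read_bit S hSl hS k (by omega)]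
    have hb1 : pvM F / 2^k % 2 ≤ 1 := by omega
    have hb2 : pvM S / 2^k % 2 ≤ 1 := by omega
    have hc : pvCarry F S k ≤ 1 := (carry_step (pvM F) (pvM S) k).1
    rw [branch_pair _ _ _ _ _ hb1 hb2 hc]
    simp only [pvCarry]
    have hbit := (carry_step (pvM F) (pvM S) k).2.1
    have hcar := (carry_step (pvM F) (pvM S) k).2.2
    simp only [hbit, hcar]
    rw [pvAns_succ F S k (by omega)]

theorem slice_straight (F : List String) (hFl : F.length = 16) :
    PySem.List.slice F (some 2) (some 16) = (F.drop 2).take 14 := by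
  rw [PySem.List.slice_of_nonneg F (by norm_num) (by norm_num) (by rw [hFl]; norm_num) (by rw [hFl]; norm_num)]
  rfl

theorem mask_bit (m j : Nat) (hj : j < 14) :
    (m &&& 16383) / 2^j % 2 = m / 2^j % 2 := by
  have h1 : m &&& 16383 = m % 2^14 := by
    have := Nat.and_two_pow_sub_one_eq_mod m 14
    norm_num at this
    exact this
  have h2 : (2:Nat)^14 = 2^j * 2^(14 - j) := by rw [← pow_add]; congr 1; omega
  rw [h1, h2, Nat.mod_mul_right_div_self]
  exact Nat.mod_mod_of_dvd _ (dvd_pow_self 2 (by omega))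


-- ===== VERDICT (by name: the statement is the Claim_ definition above) =====
theorem sum_of_positive_spec : Claim_equal_sum_of_positive := by
  intro first_num sec_num _
  unfold Spec_sum_of_positive sum_of_positive sum_of_positive_alt
  obtain ⟨hFl, hF⟩ := straight_ok first_num
  obtain ⟨hSl, hS⟩ := straight_ok sec_num
  set F := toStraightCode first_num with hFdef
  set S := toStraightCode sec_num with hSdef
  dsimp only
  rw [loop_char F S hFl hSl hF hS 14 (by omega)]
  rw [slice_straight F hFl, slice_straight S hSl]
  dsimp only
  apply List.ext_getElem?
  intro p
  by_cases hp : p < 16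
  · rcases Nat.lt_or_ge p 2 with h2 | h2
    · interval_cases p <;>
        simp [pvAns, pvBitStr]
    · have hL : (pvAns F S 14)[p]? = some (pvBitStr (pvM F + pvM S) (15 - p)) := by
        simp only [pvAns]
        rw [List.getElem?_map, List.getElem?_range hp]
        simp only [Option.map_some]
        rw [if_pos (by omega : 16 - 14 ≤ p)]
      have hR : (["0", "0"] ++ toBits 14 ((bitsVal ((F.drop 2).take 14) + bitsVal ((S.drop 2).take 14)) &&& 16383))[p]?
          = some (if ((pvM F + pvM S) &&& 16383) / 2^(14 - 1 - (p - 2)) % 2 = 1 then "1" else "0") := by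
        rw [List.getElem?_append_right (by simp; omega)]
        simp only [List.length_cons, List.length_nil]
        rw [toBits_getElem 14 _ (p - 2) (by omega)]
        rfl
      rw [hL, hR]
      have he : 14 - 1 - (p - 2) = 15 - p := by omega
      rw [he, mask_bit _ _ (by omega)]
      rfl
  · have hLn : (pvAns F S 14)[p]? = none := by
      rw [List.getElem?_eq_none]
      simp [pvAns]
      omega
    have hRn : (["0", "0"] ++ toBits 14 ((bitsVal ((F.drop 2).take 14) + bitsVal ((S.drop 2).take 14)) &&& 16383))[p]? = none := by
      rw [List.getElem?_eq_none]
      simp [toBits_length]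
      omega
    rw [hLn, hRn]
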